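-- pv_equiv track=rewrite | github.com/twiemold/AOC-2022 | day6/main.py | find_packet_start
-- ===== SOURCE A (Python) =====
-- def find_packet_start(data: str, start_message_size: int) -> int:
--     left = 0
--     right = start_message_size
--     for right in range(right, len(data)):
--         if len(set(data[left:right])) == len(data[left:right]):
--             return right
--         else:
--             left += 1
-- ===== SOURCE B (Python) =====
-- def find_packet_start(data: str, start_message_size: int) -> int:
--     # O(n) sliding window: win = smallest start of an all-distinct window ending at r
--     last_seen = {}
--     win = 0
--     for r, c in enumerate(data):
--         if win <= r - start_message_size:
--             return r
--         if c in last_seen and last_seen[c] >= win: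
--             win = last_seen[c] + 1
--         last_seen[c] = r
-- ===== Notes on version B (the rewrite author's own statement) =====
-- stated objective: faster
-- what changed: A rebuilds set(data[left:right]) for every position (O(k) per step); B makes one pass keeping a last-seen-index dict and the smallest start of an all-distinct window, deciding each position in O(1).
-- outside the precondition, e.g. on find_packet_start('abcab', -2): A returns -2, B returns 0
import Mathlib
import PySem

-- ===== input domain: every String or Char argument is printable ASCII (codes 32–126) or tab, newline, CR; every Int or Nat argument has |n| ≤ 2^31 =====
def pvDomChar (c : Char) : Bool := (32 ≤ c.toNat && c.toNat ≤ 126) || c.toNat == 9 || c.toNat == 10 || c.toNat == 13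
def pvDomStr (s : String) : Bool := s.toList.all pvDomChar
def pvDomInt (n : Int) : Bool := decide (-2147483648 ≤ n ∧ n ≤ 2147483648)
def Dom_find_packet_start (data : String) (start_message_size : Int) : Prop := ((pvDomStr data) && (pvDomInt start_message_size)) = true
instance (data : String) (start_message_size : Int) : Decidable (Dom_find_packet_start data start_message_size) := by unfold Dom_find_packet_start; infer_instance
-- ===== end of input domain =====

-- B replaces A's O(n·k) re-scan of every window by a one-pass O(n) sliding window with a
-- last-seen map; equivalence is proved for nonnegative window sizes (the natural domain).

-- ===== PORT A =====
def fpsLoopA (data : List Char) : List Int → Int → Option Int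
  | [], _ => none
  | r :: rest, left =>
    if (PySem.Set.ofList (PySem.List.slice data (some left) (some r))).length
        = (PySem.List.slice data (some left) (some r)).length
    then some r
    else fpsLoopA data rest (left + 1)

def find_packet_start (data : String) (start_message_size : Int) : Option Int :=
  fpsLoopA data.toList (PySem.List.pyRange start_message_size (PySem.Str.len data)) 0

-- ===== PORT B =====
def fpsLoopB (sms : Int) : List (Int × Char) → PySem.Dict Char Int → Int → Option Int
  | [], _, _ => none
  | (r, c) :: rest, last_seen, win =>
    if win ≤ r - sms then some r
    else
      let win' : Int :=
        match last_seen.get? c with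
        | some j => if win ≤ j then j + 1 else win
        | none => win
      fpsLoopB sms rest (last_seen.insert c r) win'

def find_packet_start_alt (data : String) (start_message_size : Int) : Option Int :=
  fpsLoopB start_message_size (PySem.List.enumerate data.toList) PySem.Dict.empty 0

-- ===== PRECONDITION & SPEC =====
-- Pre_ excludes negative window sizes: a negative start_message_size is outside the task's
-- natural domain, where A's negative slice bounds yield accidental values (negative "indices").
def Pre_find_packet_start (data : String) (start_message_size : Int) : Prop :=
  0 ≤ start_message_size
instance (data : String) (start_message_size : Int) : Decidable (Pre_find_packet_start data start_message_size) := by unfold Pre_find_packet_start; infer_instance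

def pvWitness_find_packet_start : String × Int := ("abab", 2)

def Spec_find_packet_start (data : String) (start_message_size : Int) (out : Option Int) : Prop := out = find_packet_start_alt data start_message_size
instance (data : String) (start_message_size : Int) (out : Option Int) : Decidable (Spec_find_packet_start data start_message_size out) := by unfold Spec_find_packet_start; infer_instance

-- ===== CLAIM (what is proved, stated in full; the proofs are below) =====
def Claim_equal_find_packet_start : Prop := ∀ (data : String) (start_message_size : Int), Dom_find_packet_start data start_message_size → Pre_find_packet_start data start_message_size → Spec_find_packet_start data start_message_size (find_packet_start data start_message_size)

-- ===== LEMMAS AND PROOFS =====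

-- The common specification: the first index r ∈ [r0, |l|) with k ≤ r whose k-window
-- l[r-k:r] has no duplicate, as an Int; none if there is no such index.
def specFind (l : List Char) (k : Nat) (r : Nat) : Option Int :=
  if _h : r < l.length then
    if k ≤ r ∧ ((l.drop (r - k)).take k).Nodup then some (r : Int)
    else specFind l k (r + 1)
  else none
termination_by l.length - r

-- index of the last occurrence of c in l before position r, if any
def lastOcc (l : List Char) : Nat → Char → Option Nat
  | 0, _ => none
  | r + 1, c => if l[r]? = some c then some r else lastOcc l r c

-- len(set(xs)) == len(xs) is exactly Nodup
lemma setLen_iff (xs : List Char) : (PySem.Set.ofList xs).length = xs.length ↔ xs.Nodup := by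
  constructor
  · intro h
    have hperm : (PySem.Set.ofList xs).Perm xs.dedup := by
      refine (List.perm_ext_iff_of_nodup (PySem.Set.nodup_ofList xs) (List.nodup_dedup xs)).mpr ?_
      intro a; rw [PySem.Set.mem_ofList, List.mem_dedup]
    have hlen : xs.dedup.length = xs.length := by rw [← hperm.length_eq, h]
    have := (List.dedup_sublist xs).eq_of_length hlen
    rw [← this]; exact List.nodup_dedup xs
  · intro h; rw [PySem.Set.ofList_eq_self_of_nodup xs h]

lemma pyRange_one_nil {a b : Int} (h : b ≤ a) : PySem.List.pyRange a b = [] := by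
  simp [PySem.List.pyRange, h]

lemma window_eq_drop (l : List Char) {a a' : Nat} (r : Nat) (h : a ≤ a') :
    (l.drop a').take (r - a') = ((l.drop a).take (r - a)).drop (a' - a) := by
  rw [List.drop_take, List.drop_drop]
  congr 1
  · omega
  · congr 1; omega

lemma nodup_window_mono {l : List Char} {a a' r : Nat} (h : a ≤ a')
    (hnd : ((l.drop a).take (r - a)).Nodup) : ((l.drop a').take (r - a')).Nodup := by
  rw [window_eq_drop l r h]; exact hnd.sublist (List.drop_sublist _ _)

lemma window_succ {l : List Char} {a r : Nat} (ha : a ≤ r) (hr : r < l.length) :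
    (l.drop a).take (r + 1 - a) = (l.drop a).take (r - a) ++ [l[r]] := by
  rw [show r + 1 - a = (r - a) + 1 by omega, List.take_add_one]
  congr 1
  rw [List.getElem?_drop, show a + (r - a) = r by omega, List.getElem?_eq_getElem hr]
  rfl

lemma mem_window {l : List Char} {a b : Nat} (_hb : b ≤ l.length) {x : Char} :
    x ∈ (l.drop a).take (b - a) ↔ ∃ m, a ≤ m ∧ m < b ∧ l[m]? = some x := by
  rw [List.mem_iff_getElem?]
  constructor
  · rintro ⟨i, hi⟩
    rw [List.getElem?_take] at hi
    by_cases hlt : i < b - a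
    · rw [if_pos hlt, List.getElem?_drop] at hi
      exact ⟨a + i, by omega, by omega, hi⟩
    · rw [if_neg hlt] at hi; exact absurd hi (by simp)
  · rintro ⟨m, ham, hmb, hm⟩
    refine ⟨m - a, ?_⟩
    rw [List.getElem?_take, if_pos (by omega), List.getElem?_drop,
      show a + (m - a) = m by omega]
    exact hm

lemma not_nodup_of_dup {l : List Char} {a b m1 m2 : Nat} (h1 : a ≤ m1) (h12 : m1 < m2)
    (h2 : m2 < b) (he : l[m1]? = l[m2]?) (hb : b ≤ l.length) :
    ¬ ((l.drop a).take (b - a)).Nodup := by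
  intro hn
  have hw1 : ((l.drop a).take (b - a))[m1 - a]? = l[m1]? := by
    rw [List.getElem?_take, if_pos (by omega), List.getElem?_drop,
      show a + (m1 - a) = m1 by omega]
  have hw2 : ((l.drop a).take (b - a))[m2 - a]? = l[m2]? := by
    rw [List.getElem?_take, if_pos (by omega), List.getElem?_drop,
      show a + (m2 - a) = m2 by omega]
  have hm2 : l[m2]? = some l[m2] := List.getElem?_eq_getElem (by omega)
  have hlen : m2 - a < ((l.drop a).take (b - a)).length := by
    have := hw2.trans hm2
    rcases List.getElem?_eq_some_iff.mp this with ⟨h, _⟩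
    exact h
  have heq : ((l.drop a).take (b - a))[m1 - a] = ((l.drop a).take (b - a))[m2 - a] := by
    have : ((l.drop a).take (b - a))[m1 - a]? = ((l.drop a).take (b - a))[m2 - a]? := by
      rw [hw1, hw2, he]
    rw [List.getElem?_eq_getElem (by omega), List.getElem?_eq_getElem hlen] at this
    exact Option.some_injective _ this
  have := (List.Nodup.getElem_inj_iff hn).mp heq
  omega

lemma nodup_concat_iff (xs : List Char) (x : Char) : (xs ++ [x]).Nodup ↔ xs.Nodup ∧ x ∉ xs := by
  constructor
  · intro h
    rcases List.nodup_append.mp h with ⟨h1, _, h3⟩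
    exact ⟨h1, fun hx => h3 x hx x (by simp) rfl⟩
  · rintro ⟨h1, h2⟩
    refine List.nodup_append.mpr ⟨h1, List.nodup_singleton x, ?_⟩
    intro a ha b hb
    rw [List.mem_singleton] at hb
    subst hb
    exact fun he => h2 (he ▸ ha)

lemma lastOcc_lt_and_eq {l : List Char} {r : Nat} {c : Char} {j : Nat}
    (h : lastOcc l r c = some j) : j < r ∧ l[j]? = some c := by
  induction r with
  | zero => simp [lastOcc] at h
  | succ r ih =>
    simp only [lastOcc] at h
    split at h
    · cases h; exact ⟨by omega, by assumption⟩
    · obtain ⟨h1, h2⟩ := ih h; exact ⟨by omega, h2⟩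

lemma lastOcc_max {l : List Char} {r : Nat} {c : Char} {j : Nat}
    (h : lastOcc l r c = some j) : ∀ m, j < m → m < r → l[m]? ≠ some c := by
  induction r with
  | zero => intro m _ hm; omega
  | succ r ih =>
    simp only [lastOcc] at h
    split at h
    · cases h; intro m hjm hmr; omega
    · rename_i hne
      intro m hjm hmr
      rcases Nat.lt_succ_iff_lt_or_eq.mp hmr with h' | h'
      · exact ih h m hjm h'
      · subst h'; exact hne

lemma lastOcc_ge {l : List Char} {r : Nat} {c : Char} {m : Nat}
    (hm : m < r) (he : l[m]? = some c) : ∃ j, lastOcc l r c = some j ∧ m ≤ j := by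
  induction r with
  | zero => omega
  | succ r ih =>
    simp only [lastOcc]
    split
    · exact ⟨r, rfl, by omega⟩
    · rename_i hne
      have hmr : m < r := by
        rcases Nat.lt_succ_iff_lt_or_eq.mp hm with h' | h'
        · exact h'
        · subst h'; exact absurd he hne
      exact ih hmr

lemma specFind_ge_len {l : List Char} {k r : Nat} (h : l.length ≤ r) :
    specFind l k r = none := by
  rw [specFind, dif_neg (by omega)]

lemma specFind_le (l : List Char) (k : Nat) : ∀ d r : Nat, k - r = d → r ≤ k →
    specFind l k r = specFind l k k := by
  intro d
  induction d with
  | zero =>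
    intro r hd hr
    have hrk : r = k := by omega
    subst hrk
    rfl
  | succ d ih =>
    intro r hd hr
    have hrk : r < k := by omega
    by_cases hlen : r < l.length
    · rw [specFind, dif_pos hlen, if_neg (by omega)]
      exact ih (r + 1) (by omega) (by omega)
    · rw [specFind_ge_len (by omega), specFind_ge_len (by omega)]

lemma loopA_eq (l : List Char) (k : Nat) : ∀ d r m : Nat, l.length - r = d → r = k + m →
    fpsLoopA l (PySem.List.pyRange (r : Int) (l.length : Int)) (m : Int) = specFind l k r := by
  intro d
  induction d with
  | zero =>
    intro r m hd hrm
    rw [pyRange_one_nil (by exact_mod_cast (by omega : l.length ≤ r)),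
      specFind_ge_len (by omega)]
    rfl
  | succ d ih =>
    intro r m hd hrm
    have hr : r < l.length := by omega
    rw [PySem.List.pyRange_one_cons (by exact_mod_cast hr)]
    have hslice : PySem.List.slice l (some (m : Int)) (some (r : Int)) = (l.drop m).take k := by
      rw [PySem.List.slice_natCast]; congr 1; omega
    rw [specFind, dif_pos hr]
    simp only [fpsLoopA, hslice]
    by_cases hnd : ((l.drop m).take k).Nodup
    · rw [if_pos ((setLen_iff _).mpr hnd),
        if_pos ⟨by omega, by rw [show r - k = m by omega]; exact hnd⟩]
    · rw [if_neg (fun h => hnd ((setLen_iff _).mp h)),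
        if_neg (fun h => hnd (by rw [show r - k = m by omega] at h; exact h.2))]
      have h1 : (r : Int) + 1 = ((r + 1 : Nat) : Int) := by push_cast; ring
      have h2 : (m : Int) + 1 = ((m + 1 : Nat) : Int) := by push_cast; ring
      rw [h1, h2]
      exact ih (r + 1) (m + 1) (by omega) (by omega)

lemma loopB_eq (l : List Char) (k : Nat) : ∀ d r : Nat, l.length - r = d →
    ∀ (last_seen : PySem.Dict Char Int) (win : Nat),
    win ≤ r → r ≤ l.length →
    (∀ c, last_seen.get? c = (lastOcc l r c).map (Nat.cast : Nat → Int)) →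
    ((l.drop win).take (r - win)).Nodup →
    (∀ w, w < win → ¬ ((l.drop w).take (r - w)).Nodup) →
    fpsLoopB (k : Int) (PySem.List.enumerate (l.drop r) (r : Int)) last_seen (win : Int)
      = specFind l k r := by
  intro d
  induction d with
  | zero =>
    intro r hd last_seen win _ hrlen _ _ _
    rw [List.drop_of_length_le (by omega), specFind_ge_len (by omega)]
    rfl
  | succ d ih =>
    intro r hd last_seen win hwr hrlen hD hW2 hW3
    have hr : r < l.length := by omega
    rw [List.drop_eq_getElem_cons hr, PySem.List.enumerate_cons]
    simp only [fpsLoopB]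
    rw [specFind, dif_pos hr]
    by_cases hcond : (win : Int) ≤ (r : Int) - (k : Int)
    · -- hit: both return some r
      have hk : k ≤ r := by omega
      have hwin : win ≤ r - k := by omega
      have hnd : ((l.drop (r - k)).take k).Nodup := by
        have := nodup_window_mono hwin hW2
        rwa [show r - (r - k) = k by omega] at this
      rw [if_pos hcond, if_pos ⟨hk, hnd⟩]
    · -- miss on both sides; step the loop
      have hspec : ¬ (k ≤ r ∧ ((l.drop (r - k)).take k).Nodup) := by
        rintro ⟨hk, hnd⟩
        have hwin : r - k < win := by omega
        exact hW3 _ hwin (by rwa [show r - (r - k) = k by omega])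
      rw [if_neg hcond, if_neg hspec]
      set c := l[r] with hc
      have hcr : l[r]? = some c := List.getElem?_eq_getElem hr
      -- the new window start, as a Nat
      have hD' : ∀ win'' : Nat,
          win'' ≤ r + 1 →
          ((l.drop win'').take (r + 1 - win'')).Nodup →
          (∀ w, w < win'' → ¬ ((l.drop w).take (r + 1 - w)).Nodup) →
          fpsLoopB (k : Int) (PySem.List.enumerate (l.drop (r + 1)) ((r : Int) + 1))
            (last_seen.insert c (r : Int)) (win'' : Int) = specFind l k (r + 1) := by
        intro win'' h1 h2 h3
        rw [show (r : Int) + 1 = ((r + 1 : Nat) : Int) by push_cast; ring]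
        refine ih (r + 1) (by omega) _ win'' h1 (by omega) ?_ h2 h3
        intro c'
        rw [PySem.Dict.get?_insert]
        by_cases hcc : c' = c
        · rw [if_pos hcc, hcc]
          have hv : lastOcc l (r + 1) c = some r := by
            simp only [lastOcc]; rw [if_pos hcr]
          rw [hv]
          rfl
        · rw [if_neg hcc, hD c']
          have hv : lastOcc l (r + 1) c' = lastOcc l r c' := by
            simp only [lastOcc]
            rw [if_neg (by rw [hcr]; intro h; exact hcc (Option.some_injective _ h).symm)]
          rw [hv]
      rw [hD c]
      cases hLO : lastOcc l r c with
      | none =>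
        -- c does not occur before r: the window keeps its start
        simp only [Option.map_none]
        have hnotin : c ∉ (l.drop win).take (r - win) := by
          rw [mem_window (by omega)]
          rintro ⟨m, _, hmr, hm⟩
          obtain ⟨j, hj, _⟩ := lastOcc_ge hmr hm
          rw [hLO] at hj; cases hj
        refine hD' win (by omega) ?_ ?_
        · rw [window_succ (by omega) hr, nodup_concat_iff]
          exact ⟨hW2, hnotin⟩
        · intro w hw hnd
          rw [window_succ (by omega) hr] at hnd
          exact hW3 w hw (hnd.sublist (List.sublist_append_left _ _))
      | some jn =>
        obtain ⟨hjr, hjc⟩ := lastOcc_lt_and_eq hLO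
        simp only [Option.map_some]
        by_cases hwj : (win : Int) ≤ (jn : Int)
        · -- duplicate inside the window: start moves to jn + 1
          rw [if_pos hwj, show (jn : Int) + 1 = ((jn + 1 : Nat) : Int) by push_cast; ring]
          refine hD' (jn + 1) (by omega) ?_ ?_
          · rw [window_succ (by omega) hr, nodup_concat_iff]
            refine ⟨nodup_window_mono (by omega) hW2, ?_⟩
            intro hmem
            rw [mem_window (by omega)] at hmem
            obtain ⟨m, hm1, hm2, hm3⟩ := hmem
            exact lastOcc_max hLO m (by omega) hm2 hm3
          · intro w hw
            exact not_nodup_of_dup (by omega) hjr (by omega) (hjc.trans hcr.symm) (by omega)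
        · -- last occurrence is before the window: start unchanged
          rw [if_neg hwj]
          have hnotin : c ∉ (l.drop win).take (r - win) := by
            rw [mem_window (by omega)]
            rintro ⟨m, hm1, hm2, hm3⟩
            obtain ⟨j, hj, hmj⟩ := lastOcc_ge hm2 hm3
            rw [hLO] at hj
            cases hj
            omega
          refine hD' win (by omega) ?_ ?_
          · rw [window_succ (by omega) hr, nodup_concat_iff]
            exact ⟨hW2, hnotin⟩
          · intro w hw hnd
            rw [window_succ (by omega) hr] at hnd
            exact hW3 w hw (hnd.sublist (List.sublist_append_left _ _))

-- ===== VERDICT (by name: the statement is the Claim_ definition above) =====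
theorem find_packet_start_spec : Claim_equal_find_packet_start := by
  intro data sms _hDom hPre
  unfold Spec_find_packet_start
  set l := data.toList with hl
  set k := sms.toNat with hk
  have hsms : sms = (k : Int) := (Int.toNat_of_nonneg hPre).symm
  have hA : find_packet_start data sms = specFind l k k := by
    unfold find_packet_start
    rw [hsms, show PySem.Str.len data = (l.length : Int) by simp [PySem.Str.len, hl, String.length_toList]]
    have hlen : data.length = l.length := String.length_toList.symm
    have := loopA_eq l k (l.length - k) k 0 rfl (by omega)
    simpa [hlen] using this
  have hB : find_packet_start_alt data sms = specFind l k 0 := by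
    unfold find_packet_start_alt
    rw [hsms]
    have := loopB_eq l k l.length 0 rfl PySem.Dict.empty 0 (by omega) (by omega)
      (fun c => by rw [PySem.Dict.get?_empty]; rfl)
      (by simp) (fun w hw => by omega)
    simpa using this
  rw [hA, hB, specFind_le l k k 0 rfl (by omega)]
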